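-- pv_equiv track=rewrite | github.com/latha9397/aapkapainter-tasks | demo1.py | player_score
-- ===== SOURCE A (Python) =====
-- def player_score(arr):
--     player1_score = arr[0]
--     player2_score = 0
--     prev = arr[0]
--     current_player = 'p2' if arr[0]%2==0 else 'p1'
--     for score in arr[1:]:
--         if  prev%2!=0:
--             current_player = 'p2' if current_player=='p1' else 'p1'
--         if current_player=='p1':
--             player1_score+=score
--         else:
--             player2_score+=score
--         prev = score
--     return player1_score,player2_score
-- ===== SOURCE B (Python) =====
-- def player_score(arr):
--     # Two-pass: build the ownership list from a running parity of odd-flags, then sum.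
--     # Index 0 belongs to player1; index i>=1 belongs to player1 iff the number of odd
--     # elements among arr[1..i-1] is odd (A's toggle chain starts at player2 for arr[1]).
--     flags = [x % 2 for x in arr]
--     owners = [True]
--     s = 0
--     for f in flags[1:]:
--         owners.append(s % 2 == 1)
--         s += f
--     p1 = sum(x for x, o in zip(arr, owners) if o)
--     p2 = sum(x for x, o in zip(arr, owners) if not o)
--     return p1, p2
-- ===== Notes on version B (the rewrite author's own statement) =====
-- stated objective: alternative
-- what changed: Replaces A's single stateful loop (running prev element and a toggling current-player string) by a two-pass decomposition: first build an ownership list from the running parity of odd-flags, then sum each player's elements from the arr/owners zip.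
-- crash fix: On the empty list A raises IndexError (arr[0]) while B naturally returns (0, 0). — e.g. on player_score([]): A raises IndexError, B returns (0, 0)
import Mathlib
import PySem

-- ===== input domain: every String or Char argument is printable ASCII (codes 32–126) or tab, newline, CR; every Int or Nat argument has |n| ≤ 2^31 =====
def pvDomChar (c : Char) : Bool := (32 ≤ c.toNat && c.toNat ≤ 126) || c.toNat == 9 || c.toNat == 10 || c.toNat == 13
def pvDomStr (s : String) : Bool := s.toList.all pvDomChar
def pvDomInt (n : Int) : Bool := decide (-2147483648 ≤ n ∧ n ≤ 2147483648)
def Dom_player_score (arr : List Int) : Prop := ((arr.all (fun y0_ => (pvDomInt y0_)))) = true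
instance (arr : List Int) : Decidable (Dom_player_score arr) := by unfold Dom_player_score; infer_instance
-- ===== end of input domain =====

-- B replaces A's single stateful toggle loop by a two-pass decomposition (ownership list from
-- a running odd-count parity, then two sums); same cost, objective: alternative decomposition.

-- ===== PORT A =====
-- loop body of A; state (p1, p2, prev, curIsP1)
def psAstep (st : Int × Int × Int × Bool) (score : Int) : Int × Int × Int × Bool :=
  let cur := if PySem.Int.mod st.2.2.1 2 ≠ 0 then !st.2.2.2 else st.2.2.2
  ((if cur then st.1 + score else st.1), (if !cur then st.2.1 + score else st.2.1), score, cur)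

-- 'arr.drop 1' is arr[1:] exactly (nonnegative slice start)
def player_score (arr : List Int) : Int × Int :=
  match arr with
  | [] => (0, 0)   -- Python raises IndexError on arr[0]; excluded by Pre_player_score
  | a0 :: _ =>
    let st := (arr.drop 1).foldl psAstep
      (a0, 0, a0, if PySem.Int.mod a0 2 = 0 then false else true)
    (st.1, st.2.1)

-- ===== PORT B =====
-- loop body of B's owners pass; state (owners, s)
def psBstep (st : List Bool × Int) (f : Int) : List Bool × Int :=
  (st.1 ++ [decide (PySem.Int.mod st.2 2 = 1)], st.2 + f)

def player_score_alt (arr : List Int) : Int × Int :=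
  let flags := arr.map (fun x => PySem.Int.mod x 2)
  let ow := (flags.drop 1).foldl psBstep ([true], 0)
  let pairs := arr.zip ow.1
  let p1 := ((pairs.filter (fun p => p.2)).map (·.1)).sum
  let p2 := ((pairs.filter (fun p => !p.2)).map (·.1)).sum
  (p1, p2)

-- ===== PRECONDITION & SPEC =====
-- Pre_ excludes exactly the empty list, where A raises IndexError on arr[0].
def Pre_player_score (arr : List Int) : Prop := arr ≠ []
instance (arr : List Int) : Decidable (Pre_player_score arr) := by unfold Pre_player_score; infer_instance
def pvWitness_player_score : List Int := ([3, 4, 5])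

-- On the empty list A raises IndexError while B naturally returns (0, 0).
def Raises_player_score (arr : List Int) : Prop := arr = []
instance (arr : List Int) : Decidable (Raises_player_score arr) := by unfold Raises_player_score; infer_instance
def pvRaiseWitness_player_score : List Int := ([])
def pvRaiseWitnessOut_player_score : Int × Int := (0, 0)

def Spec_player_score (arr : List Int) (out : Int × Int) : Prop := out = player_score_alt arr
instance (arr : List Int) (out : Int × Int) : Decidable (Spec_player_score arr out) := by unfold Spec_player_score; infer_instance

-- ===== CLAIM (what is proved, stated in full; the proofs are below) =====
def Claim_equal_player_score : Prop := ∀ (arr : List Int), Dom_player_score arr → Pre_player_score arr → Spec_player_score arr (player_score arr)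
def Claim_raises_player_score : Prop := (∀ (arr : List Int), Dom_player_score arr → Raises_player_score arr → ¬ Pre_player_score arr) ∧ (Dom_player_score (pvRaiseWitness_player_score) ∧ Raises_player_score (pvRaiseWitness_player_score) ∧ player_score_alt (pvRaiseWitness_player_score) = pvRaiseWitnessOut_player_score)

-- ===== LEMMAS AND PROOFS =====

-- bridge: the ports' Python mod with positive divisor 2 is Lean's emod
lemma psMod (a : Int) : PySem.Int.mod a 2 = a % 2 :=
  PySem.Int.mod_eq_emod_of_pos (by omega)

-- common recursive reference: per-player sums over the tail, owner toggled after an odd element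
def psS1 : List Int → Bool → Int
  | [], _ => 0
  | x :: t, o => (if o then x else 0) + psS1 t (if x % 2 ≠ 0 then !o else o)

def psS2 : List Int → Bool → Int
  | [], _ => 0
  | x :: t, o => (if o then 0 else x) + psS2 t (if x % 2 ≠ 0 then !o else o)

lemma psA_loop (t : List Int) : ∀ (p1 p2 prev : Int) (cur : Bool),
    (t.foldl psAstep (p1, p2, prev, cur)).1
      = p1 + psS1 t (if prev % 2 ≠ 0 then !cur else cur)
  ∧ (t.foldl psAstep (p1, p2, prev, cur)).2.1
      = p2 + psS2 t (if prev % 2 ≠ 0 then !cur else cur) := by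
  induction t with
  | nil => intro p1 p2 prev cur; simp [psS1, psS2]
  | cons x t ih =>
    intro p1 p2 prev cur
    set o := if prev % 2 ≠ 0 then !cur else cur with ho
    have hstep : psAstep (p1, p2, prev, cur) x
        = ((if o then p1 + x else p1), (if !o then p2 + x else p2), x, o) := by
      simp only [psAstep, psMod, ho]
    have key := ih (if o then p1 + x else p1) (if !o then p2 + x else p2) x o
    simp only [List.foldl_cons, hstep, key.1, key.2, psS1, psS2]
    constructor <;> cases o <;> simp <;> ring

-- B's owners fold builds the list ahead of the accumulator
def psOwners : List Int → Int → List Bool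
  | [], _ => []
  | f :: t, s => decide (s % 2 = 1) :: psOwners t (s + f)

lemma psB_owners (t : List Int) : ∀ (ow : List Bool) (s : Int),
    (t.foldl psBstep (ow, s)).1 = ow ++ psOwners t s := by
  induction t with
  | nil => simp [psOwners]
  | cons f t ih =>
    intro ow s
    simp only [List.foldl_cons, psBstep, psMod, psOwners]
    rw [ih]
    simp

lemma psOwner_step (x s : Int) :
    decide ((s + x % 2) % 2 = 1)
      = (if x % 2 ≠ 0 then !(decide (s % 2 = 1)) else decide (s % 2 = 1)) := by
  rcases Int.emod_two_eq x with hx | hx <;> rcases Int.emod_two_eq s with hs | hs <;>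
    simp [hx, hs] <;> omega

lemma psB_sums (t : List Int) : ∀ (s : Int),
    (((t.zip (psOwners (t.map (fun x => x % 2)) s)).filter (fun p => p.2)).map (·.1)).sum
        = psS1 t (decide (s % 2 = 1))
  ∧ (((t.zip (psOwners (t.map (fun x => x % 2)) s)).filter (fun p => !p.2)).map (·.1)).sum
        = psS2 t (decide (s % 2 = 1)) := by
  induction t with
  | nil => simp [psS1, psS2, psOwners]
  | cons x t ih =>
    intro s
    have iht := ih (s + x % 2)
    rw [psOwner_step x s] at iht
    simp only [List.map_cons, psOwners, List.zip_cons_cons, List.filter_cons, psS1, psS2]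
    rcases Int.emod_two_eq x with hx | hx <;>
      simp only [hx, add_zero] at iht <;>
      by_cases h : s % 2 = 1 <;>
      simp [hx, h] at iht ⊢ <;>
      exact ⟨iht.1, iht.2⟩

-- ===== VERDICT (by name: the statement is the Claim_ definition above) =====
theorem player_score_spec : Claim_equal_player_score := by
  intro arr _ hpre
  unfold Spec_player_score
  match arr with
  | [] => exact absurd rfl hpre
  | a0 :: t =>
    have hA := psA_loop t a0 0 a0 (if PySem.Int.mod a0 2 = 0 then false else true)
    have hOw := psB_owners (t.map (fun x => PySem.Int.mod x 2)) [true] 0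
    have hB := psB_sums t 0
    -- A's starting owner for the tail is player2, whatever a0's parity is
    have hstart : (if a0 % 2 ≠ 0 then !(if PySem.Int.mod a0 2 = 0 then false else true)
        else (if PySem.Int.mod a0 2 = 0 then false else true)) = false := by
      rw [psMod]
      rcases Int.emod_two_eq a0 with h | h <;> simp [h]
    rw [hstart] at hA
    have h0 : decide ((0:Int) % 2 = 1) = false := by decide
    rw [h0] at hB
    have hmapeq : t.map (fun x => PySem.Int.mod x 2) = t.map (fun x => x % 2) := by
      simp only [psMod]
    rw [hmapeq] at hOw
    show (player_score (a0 :: t)) = player_score_alt (a0 :: t)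
    unfold player_score player_score_alt
    simp only [List.map_cons, List.drop_succ_cons, List.drop_zero, hmapeq, hOw,
      List.cons_append, List.nil_append, List.zip_cons_cons, List.filter_cons]
    rw [hA.1, hA.2]
    simp only [reduceIte, Bool.not_true, Bool.false_eq_true, List.map_cons, List.sum_cons,
      hB.1, hB.2]
    simp

@[simp]
theorem player_score_raises : Claim_raises_player_score := by
  unfold Claim_raises_player_score
  exact ⟨fun arr _ h hp => hp h, by decide⟩
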